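-- pv_equiv track=rewrite | github.com/C-B-U/algorithm_challenge | 시즌12/중/HongSeokYoung/250205_3_HongSeokYoung.py | shuttle_run
-- ===== SOURCE A (Python) =====
-- def shuttle_run(n):
--     d = 0
--
--     while n > 0:
--         d = 0
--         # 콘을 지나는 횟수
--         for i in [1, 2, 3, 4]:
--             # 출발 구간
--             for _ in range(i):
--                 n -= 5
--                 if n <= 0:
--                     d += 5 + n
--                     break
--                 d += 5
--             if n <= 0:
--                 break
--
--             # 복귀 구간
--             for _ in range(i):
--                 n -= 5
--                 if n <= 0:
--                     d -= 5 + n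
--                     break
--                 d -= 5
--             if n <= 0:
--                 break
--
--     return d // 5 if d % 5 == 0 else d // 5 + 1
-- ===== SOURCE B (Python) =====
-- def _cycle_distance(r):
--     # answer for an effective distance r in 1..100
--     t = (r + 4) // 5               # index of the 5m step being run when n hits 0, 1..20
--     i = 1 + (t > 2) + (t > 6) + (t > 12)   # leg number: out-leg i covers steps i(i-1)+1..i^2, back-leg i covers i^2+1..i(i+1)
--     if t <= i * i:                 # outbound leg: distance rounds up to the k-th cone
--         return t - i * (i - 1)
--     k = t - i * i                  # return leg: position i-k cones, partial step rounds up
--     return i - k + (1 if r % 5 else 0)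
--
-- def shuttle_run(n):
--     # O(1): reduce n modulo the 100m period, locate the 5m step arithmetically.
--     if n <= 0:
--         return 0
--     return _cycle_distance((n - 1) % 100 + 1)
-- ===== Notes on version B (the rewrite author's own statement) =====
-- stated objective: faster
-- what changed: replaced the step-by-step decrement simulation (while loop subtracting 5 until n <= 0) by an O(1) reduction of n modulo the 100m shuttle cycle plus a closed-form arithmetic location of the final 5m step and leg
import Mathlib
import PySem

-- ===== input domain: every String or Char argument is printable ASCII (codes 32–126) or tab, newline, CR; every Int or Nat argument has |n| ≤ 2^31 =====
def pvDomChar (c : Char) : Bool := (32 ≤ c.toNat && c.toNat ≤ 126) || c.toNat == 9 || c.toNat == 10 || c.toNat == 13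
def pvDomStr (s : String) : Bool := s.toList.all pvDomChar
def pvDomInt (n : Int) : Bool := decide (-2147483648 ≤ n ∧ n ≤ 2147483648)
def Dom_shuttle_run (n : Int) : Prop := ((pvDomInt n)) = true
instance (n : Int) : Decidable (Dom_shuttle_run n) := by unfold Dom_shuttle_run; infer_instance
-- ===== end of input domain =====

-- B replaces A's step-by-step decrement loop by an O(1) modulo-100 reduction and an
-- arithmetic location of the final 5m step (objective: faster).

-- ===== PORT A =====
-- inner `for _ in range(i)` of the outbound segment: returns (n, d, broke)
def outSteps : Nat → Int → Int → Int × Int × Bool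
  | 0, n, d => (n, d, false)
  | k + 1, n, d =>
    let n' := n - 5
    if n' ≤ 0 then (n', d + 5 + n', true)
    else outSteps k n' (d + 5)

-- inner `for _ in range(i)` of the return segment
def backSteps : Nat → Int → Int → Int × Int × Bool
  | 0, n, d => (n, d, false)
  | k + 1, n, d =>
    let n' := n - 5
    if n' ≤ 0 then (n', d - (5 + n'), true)
    else backSteps k n' (d - 5)

-- `for i in [1, 2, 3, 4]` with its two early breaks (`break` ⟺ n ≤ 0 after the segment)
def iLoop : List Nat → Int → Int → Int × Int
  | [], n, d => (n, d)
  | i :: rest, n, d =>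
    let p := outSteps i n d
    if p.1 ≤ 0 then (p.1, p.2.1)
    else
      let q := backSteps i p.1 p.2.1
      if q.1 ≤ 0 then (q.1, q.2.1)
      else iLoop rest q.1 q.2.1

-- termination lemmas for the `while` loop (cited by `decreasing_by`)
theorem outSteps_fst (k : Nat) : ∀ (n d : Int),
    (outSteps k n d).1 ≤ 0 ∨ (outSteps k n d).1 = n - 5 * k := by
  induction k with
  | zero => intro n d; right; simp [outSteps]
  | succ k ih =>
    intro n d
    simp only [outSteps]
    split
    · left; assumption
    · rcases ih (n - 5) (d + 5) with h | h
      · left; exact h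
      · right; rw [h]; push_cast; ring

theorem backSteps_fst (k : Nat) : ∀ (n d : Int),
    (backSteps k n d).1 ≤ 0 ∨ (backSteps k n d).1 = n - 5 * k := by
  induction k with
  | zero => intro n d; right; simp [backSteps]
  | succ k ih =>
    intro n d
    simp only [backSteps]
    split
    · left; assumption
    · rcases ih (n - 5) (d - 5) with h | h
      · left; exact h
      · right; rw [h]; push_cast; ring

theorem iLoop_fst (l : List Nat) : ∀ (n d : Int),
    (iLoop l n d).1 ≤ 0 ∨ (iLoop l n d).1 = n - 10 * (l.sum : Int) := by
  induction l with
  | nil => intro n d; right; simp [iLoop]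
  | cons i rest ih =>
    intro n d
    simp only [iLoop]
    split
    · left; assumption
    · rename_i hp
      rcases outSteps_fst i n d with hout | hout
      · exact absurd hout (by omega)
      · split
        · left; assumption
        · rcases backSteps_fst i (outSteps i n d).1 (outSteps i n d).2.1 with hback | hback
          · rename_i hq; exact absurd hback (by omega)
          · rcases ih (backSteps i (outSteps i n d).1 (outSteps i n d).2.1).1
              (backSteps i (outSteps i n d).1 (outSteps i n d).2.1).2.1 with h | h
            · left; exact h
            · right; rw [h, hback, hout]; push_cast [List.sum_cons]; ring

theorem iLoop_full_fst (n d : Int) :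
    (iLoop [1, 2, 3, 4] n d).1 ≤ 0 ∨ (iLoop [1, 2, 3, 4] n d).1 = n - 100 := by
  have h := iLoop_fst [1, 2, 3, 4] n d
  simpa using h

-- `while n > 0:` loop; `d` is reset to 0 at the top of every iteration
def shuttleWhile (n d : Int) : Int :=
  if h : 0 < n then
    let p := iLoop [1, 2, 3, 4] n 0
    shuttleWhile p.1 p.2
  else d
termination_by n.toNat
decreasing_by
  rcases iLoop_full_fst n 0 with h' | h' <;> omega

def shuttle_run (n : Int) : Int :=
  let d := shuttleWhile n 0
  if PySem.Int.mod d 5 = 0 then PySem.Int.floordiv d 5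
  else PySem.Int.floordiv d 5 + 1

-- ===== PORT B =====
-- helper _cycle_distance of Source B: answer for an effective distance r ∈ [1, 100]
def cycleDistance (r : Int) : Int :=
  let t := PySem.Int.floordiv (r + 4) 5
  let i : Int := 1 + (if 2 < t then 1 else 0) + (if 6 < t then 1 else 0) + (if 12 < t then 1 else 0)
  if t ≤ i * i then t - i * (i - 1)
  else
    let k := t - i * i
    i - k + (if PySem.Int.mod r 5 ≠ 0 then 1 else 0)

def shuttle_run_alt (n : Int) : Int :=
  if n ≤ 0 then 0 else cycleDistance (PySem.Int.mod (n - 1) 100 + 1)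

-- ===== PRECONDITION & SPEC =====
def Spec_shuttle_run (n : Int) (out : Int) : Prop := out = shuttle_run_alt n
instance (n : Int) (out : Int) : Decidable (Spec_shuttle_run n out) := by unfold Spec_shuttle_run; infer_instance

-- ===== CLAIM (what is proved, stated in full; the proofs are below) =====
def Claim_equal_shuttle_run : Prop := ∀ (n : Int), Dom_shuttle_run n → Spec_shuttle_run n (shuttle_run n)

-- ===== LEMMAS AND PROOFS =====

theorem outSteps_full (k : Nat) : ∀ (n d : Int), 5 * (k : Int) < n →
    outSteps k n d = (n - 5 * k, d + 5 * k, false) := by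
  induction k with
  | zero => intro n d _; simp [outSteps]
  | succ k ih =>
    intro n d h
    have hk : ¬ n - 5 ≤ 0 := by push_cast at h; omega
    simp only [outSteps, hk, if_false]
    rw [ih (n - 5) (d + 5) (by push_cast at h ⊢; omega)]
    push_cast
    simp only [Prod.mk.injEq]
    exact ⟨by ring, by ring, trivial⟩

theorem backSteps_full (k : Nat) : ∀ (n d : Int), 5 * (k : Int) < n →
    backSteps k n d = (n - 5 * k, d - 5 * k, false) := by
  induction k with
  | zero => intro n d _; simp [backSteps]
  | succ k ih =>
    intro n d h
    have hk : ¬ n - 5 ≤ 0 := by push_cast at h; omega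
    simp only [backSteps, hk, if_false]
    rw [ih (n - 5) (d - 5) (by push_cast at h ⊢; omega)]
    push_cast
    simp only [Prod.mk.injEq]
    exact ⟨by ring, by ring, trivial⟩

theorem iLoop_run_full (l : List Nat) : ∀ (n d : Int), 10 * (l.sum : Int) < n →
    iLoop l n d = (n - 10 * (l.sum : Int), d) := by
  induction l with
  | nil => intro n d _; simp [iLoop]
  | cons i rest ih =>
    intro n d h
    have hsum : (0 : Int) ≤ (rest.sum : Int) := by positivity
    have hi : (0 : Int) ≤ (i : Int) := by positivity
    have hcast : ((i :: rest).sum : Int) = (i : Int) + (rest.sum : Int) := by push_cast [List.sum_cons]; ring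
    rw [hcast] at h
    simp only [iLoop]
    rw [outSteps_full i n d (by omega)]
    have h1 : ¬ (n - 5 * (i : Int) ≤ 0) := by omega
    simp only [h1, if_false]
    rw [backSteps_full i (n - 5 * i) (d + 5 * i) (by omega)]
    have h2 : ¬ (n - 5 * (i : Int) - 5 * i ≤ 0) := by omega
    simp only [h2, if_false]
    rw [ih (n - 5 * i - 5 * i) (d + 5 * i - 5 * i) (by omega)]
    rw [hcast]
    simp only [Prod.mk.injEq]
    exact ⟨by ring, by ring⟩

theorem shuttleWhile_nonpos (n d : Int) (h : ¬ 0 < n) : shuttleWhile n d = d := by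
  rw [shuttleWhile]; simp [h]

theorem shuttleWhile_small (n d : Int) (h0 : 0 < n) (h100 : n ≤ 100) :
    shuttleWhile n d = (iLoop [1, 2, 3, 4] n 0).2 := by
  rw [shuttleWhile]
  simp only [h0, dif_pos]
  have : (iLoop [1, 2, 3, 4] n 0).1 ≤ 0 := by
    rcases iLoop_full_fst n 0 with h | h <;> omega
  exact shuttleWhile_nonpos _ _ (by omega)

theorem shuttleWhile_step (n : Int) (h : 100 < n) :
    shuttleWhile n 0 = shuttleWhile (n - 100) 0 := by
  rw [shuttleWhile]
  simp only [show 0 < n by omega, dif_pos]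
  have hfull := iLoop_run_full [1, 2, 3, 4] n 0 (by simpa using h)
  simp only [hfull]
  norm_num

theorem shuttleWhile_mod_fuel (k : Nat) : ∀ (n : Int), n.toNat ≤ k → 0 < n →
    shuttleWhile n 0 = shuttleWhile ((n - 1) % 100 + 1) 0 := by
  induction k with
  | zero => intro n hk h0; omega
  | succ k ih =>
    intro n hk h0
    by_cases h100 : n ≤ 100
    · have : (n - 1) % 100 + 1 = n := by omega
      rw [this]
    · rw [shuttleWhile_step n (by omega)]
      rw [ih (n - 100) (by omega) (by omega)]
      have : (n - 100 - 1) % 100 = (n - 1) % 100 := by omega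
      rw [this]

theorem shuttleWhile_mod (n : Int) (h0 : 0 < n) :
    shuttleWhile n 0 = shuttleWhile ((n - 1) % 100 + 1) 0 :=
  shuttleWhile_mod_fuel n.toNat n le_rfl h0

set_option maxRecDepth 4000 in
theorem small_cases : ∀ r ∈ Finset.Icc (1 : Int) 100,
    (if PySem.Int.mod (iLoop [1, 2, 3, 4] r 0).2 5 = 0
      then PySem.Int.floordiv (iLoop [1, 2, 3, 4] r 0).2 5
      else PySem.Int.floordiv (iLoop [1, 2, 3, 4] r 0).2 5 + 1) = cycleDistance r := by
  decide

-- ===== VERDICT (by name: the statement is the Claim_ definition above) =====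
theorem shuttle_run_spec : Claim_equal_shuttle_run := by
  intro n _
  unfold Spec_shuttle_run shuttle_run
  by_cases h0 : 0 < n
  · set r := (n - 1) % 100 + 1 with hr
    have hrange : 1 ≤ r ∧ r ≤ 100 := by constructor <;> omega
    have hmod : PySem.Int.mod (n - 1) 100 = (n - 1) % 100 :=
      PySem.Int.mod_eq_emod_of_pos (by norm_num)
    rw [shuttleWhile_mod n h0, shuttleWhile_small r 0 (by omega) (by omega)]
    rw [small_cases r (Finset.mem_Icc.mpr hrange)]
    unfold shuttle_run_alt
    rw [if_neg (by omega), hmod]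
  · rw [shuttleWhile_nonpos n 0 h0]
    unfold shuttle_run_alt
    rw [if_pos (show PySem.Int.mod (0 : Int) 5 = 0 by decide),
      if_pos (show n ≤ 0 by omega)]
    decide
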